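-- pv_equiv track=rewrite | github.com/kamilpajak/Heisenberg | src/heisenberg/reports/handlers/playwright.py | _find_report_root
-- ===== SOURCE A (Python) =====
-- INDEX_HTML = "index.html"
--
-- def _find_report_root(namelist: list[str]) -> str | None:
--     """Find directory prefix containing a valid Playwright report.
--
--     GitHub Actions wraps artifacts in subdirectories, so we need to search
--     recursively rather than only checking the root.
--
--     Returns:
--         Directory prefix (e.g., "playwright-report/") or empty string for root,
--         or None if no valid report structure found.
--     """
--     # Look for HTML report structure (index.html + data/ sibling)
--     for name in namelist:
--         if name.endswith(INDEX_HTML):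
--             # Extract prefix: "subdir/index.html" -> "subdir/"
--             prefix = name[: -len(INDEX_HTML)]
--             data_dir = f"{prefix}data/"
--             if any(n.startswith(data_dir) for n in namelist):
--                 return prefix
--
--     # Look for blob report structure (.zip files without index.html)
--     # Group files by their parent directory
--     dirs_with_zips: dict[str, list[str]] = {}
--     for name in namelist:
--         if name.endswith(".zip"):
--             # Get parent dir: "subdir/file.zip" -> "subdir/"
--             if "/" in name:
--                 parent = name.rsplit("/", 1)[0] + "/"
--             else:
--                 parent = ""
--             dirs_with_zips.setdefault(parent, []).append(name)
--
--     # Find a directory with .zip files but no index.html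
--     for prefix, zips in dirs_with_zips.items():
--         index_path = f"{prefix}{INDEX_HTML}" if prefix else INDEX_HTML
--         if index_path not in namelist and zips:
--             return prefix
--
--     return None
-- ===== SOURCE B (Python) =====
-- INDEX_HTML = "index.html"
--
--
-- def _find_report_root(namelist: list[str]) -> str | None:
--     # Single pass: build every table in one loop, no inner rescans of namelist.
--     names = set()          # all names
--     idx_order = []         # index.html prefixes, namelist order
--     data_parents = set()   # every p such that some name starts with p + "data/"
--     zip_seen = set()
--     zip_order = []         # zip parents, first-encounter order
--     for n in namelist:
--         names.add(n)
--         if n.endswith(INDEX_HTML):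
--             idx_order.append(n[: -len(INDEX_HTML)])
--         if n.endswith(".zip"):
--             parent = n.rsplit("/", 1)[0] + "/" if "/" in n else ""
--             if parent not in zip_seen:
--                 zip_seen.add(parent)
--                 zip_order.append(parent)
--         # enumerate every occurrence of "data/" inside n: the part before it
--         # is a directory prefix that owns a data/ child
--         for j in range(len(n)):
--             if n[j : j + 5] == "data/":
--                 data_parents.add(n[:j])
--     for p in idx_order:
--         if p in data_parents:
--             return p
--     for p in zip_order:
--         if p + INDEX_HTML not in names:
--             return p
--     return None
-- ===== Notes on version B (the rewrite author's own statement) =====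
-- stated objective: alternative
-- what changed: A single pass over namelist builds every table at once (name set, ordered index.html prefixes, ordered first-encounter zip parents, and the set of prefixes owning a data/ child found by enumerating each name's 'data/' substring occurrences), after which two plain lookup scans pick the answer; A's per-prefix any() rescans of namelist and its dict of zip-file lists disappear.
import Mathlib
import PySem

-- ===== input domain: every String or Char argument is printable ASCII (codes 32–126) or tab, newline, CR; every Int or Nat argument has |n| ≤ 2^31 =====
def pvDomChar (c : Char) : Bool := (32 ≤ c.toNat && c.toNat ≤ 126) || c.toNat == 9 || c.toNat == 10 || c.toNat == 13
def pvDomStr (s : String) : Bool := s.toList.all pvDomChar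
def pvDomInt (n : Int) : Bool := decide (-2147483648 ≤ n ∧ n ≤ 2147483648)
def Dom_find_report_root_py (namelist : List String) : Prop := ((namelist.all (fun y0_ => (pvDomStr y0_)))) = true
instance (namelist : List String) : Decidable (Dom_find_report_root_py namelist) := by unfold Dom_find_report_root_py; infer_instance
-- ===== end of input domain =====

-- B replaces A's two staged loops with inner any()-rescans and a dict of zip lists by a
-- SINGLE pass over namelist that builds every table at once (name set, ordered index.html
-- prefixes, ordered zip parents, and the set of prefixes owning a data/ child, found by
-- enumerating every "data/" substring occurrence), followed by two plain lookup scans.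
-- Objective: alternative decomposition; equivalence of return values is proved below.

-- ===== PORT A =====
-- shared string constants (as char lists; PySem strings live on List Char)
def pvIdx : List Char := ("index.html").toList
def pvData : List Char := ("data/").toList
def pvZipExt : List Char := (".zip").toList

-- prefix = name[: -len(INDEX_HTML)]   (len("index.html") = 10); identical expression in A and in Source B
def pvPrefixOf (n : List Char) : List Char := PySem.Chars.slice n none (some (-10))

-- parent = name.rsplit("/", 1)[0] + "/" if "/" in name else ""  (identical expression in A and Source B).
-- Hand port of rsplit("/",1)[0]: exact when "/" occurs in n — it is the part before the LAST "/",
-- i.e. n[:n.rfind("/")] (the branch is only taken when "/" in n).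
def pvParent (n : List Char) : List Char :=
  if PySem.Chars.isIn ['/'] n then
    PySem.Chars.slice n none (some (PySem.Chars.rfind n ['/'])) ++ ['/']
  else []

-- first loop of A: for name in namelist: if name.endswith(INDEX_HTML) and any(n.startswith(prefix+"data/")…): return prefix
def pvA_loop1 (all : List (List Char)) : List (List Char) → Option (List Char)
  | [] => none
  | n :: rest =>
    if PySem.Chars.endswith n pvIdx then
      let pre := pvPrefixOf n
      if all.any (fun m => PySem.Chars.startswith m (pre ++ pvData)) then some pre
      else pvA_loop1 all rest
    else pvA_loop1 all rest

-- dirs_with_zips: dict built by setdefault(parent, []).append(name)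
def pvA_dict (nl : List (List Char)) : PySem.Dict (List Char) (List (List Char)) :=
  nl.foldl
    (fun d n =>
      if PySem.Chars.endswith n pvZipExt then d.modify (pvParent n) [] (· ++ [n]) else d)
    PySem.Dict.empty

-- second loop of A over dirs_with_zips.items()
def pvA_loop2 (all : List (List Char)) : List (List Char × List (List Char)) → Option (List Char)
  | [] => none
  | (p, zips) :: rest =>
    let indexPath := if p ≠ [] then p ++ pvIdx else pvIdx
    if !all.contains indexPath && !zips.isEmpty then some p
    else pvA_loop2 all rest

def find_report_root_py (namelist : List String) : Option String :=
  let nl := namelist.map String.toList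
  match pvA_loop1 nl nl with
  | some p => some (String.ofList p)
  | none => (pvA_loop2 nl (pvA_dict nl).items).map String.ofList

-- ===== PORT B =====
-- inner loop of Source B: 'for j in range(len(n)): if n[j:j+5] == "data/": data_parents.add(n[:j])'
def pvB_inner (n : List Char) (s : PySem.Set (List Char)) : PySem.Set (List Char) :=
  (PySem.List.pyRange 0 (n.length : Int) 1).foldl
    (fun s j =>
      if PySem.Chars.slice n (some j) (some (j + 5)) == pvData then
        PySem.Set.add s (PySem.Chars.slice n none (some j))
      else s) s

-- zip-parent bookkeeping of Source B: 'if parent not in zip_seen: zip_seen.add(parent); zip_order.append(parent)'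
def pvZStep (pr : PySem.Set (List Char) × List (List Char)) (n : List Char) :
    PySem.Set (List Char) × List (List Char) :=
  if PySem.Chars.endswith n pvZipExt then
    let par := pvParent n
    if PySem.Set.contains pr.1 par then pr
    else (PySem.Set.add pr.1 par, pr.2 ++ [par])
  else pr

-- one iteration of Source B's single pass; state = (names, idx_order, (zip_seen, zip_order), data_parents)
def pvB_step
    (st : PySem.Set (List Char) × List (List Char) ×
          (PySem.Set (List Char) × List (List Char)) × PySem.Set (List Char))
    (n : List Char) :
    PySem.Set (List Char) × List (List Char) ×
      (PySem.Set (List Char) × List (List Char)) × PySem.Set (List Char) :=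
  (PySem.Set.add st.1 n,
   (if PySem.Chars.endswith n pvIdx then st.2.1 ++ [pvPrefixOf n] else st.2.1),
   pvZStep st.2.2.1 n,
   pvB_inner n st.2.2.2)

def find_report_root_py_alt (namelist : List String) : Option String :=
  let nl := namelist.map String.toList
  let st := nl.foldl pvB_step (PySem.Set.empty, [], (PySem.Set.empty, []), PySem.Set.empty)
  match st.2.1.find? (fun p => PySem.Set.contains st.2.2.2 p) with
  | some p => some (String.ofList p)
  | none =>
    (st.2.2.1.2.find? (fun p => !PySem.Set.contains st.1 (p ++ pvIdx))).map String.ofList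

-- ===== PRECONDITION & SPEC =====
def Spec_find_report_root_py (namelist : List String) (out : Option String) : Prop := out = find_report_root_py_alt namelist
instance (namelist : List String) (out : Option String) : Decidable (Spec_find_report_root_py namelist out) := by unfold Spec_find_report_root_py; infer_instance

-- ===== CLAIM (what is proved, stated in full; the proofs are below) =====
def Claim_equal_find_report_root_py : Prop := ∀ (namelist : List String), Dom_find_report_root_py namelist → Spec_find_report_root_py namelist (find_report_root_py namelist)

-- ===== LEMMAS AND PROOFS =====

-- proof-side closed forms of the tables Source B's single pass builds
def pvB_idxPrefixes (nl : List (List Char)) : List (List Char) :=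
  (nl.filter (fun n => PySem.Chars.endswith n pvIdx)).map pvPrefixOf

def pvZAdd (s : PySem.Set (List Char)) (n : List Char) : PySem.Set (List Char) :=
  if PySem.Chars.endswith n pvZipExt then PySem.Set.add s (pvParent n) else s

def pvB_zipParents (nl : List (List Char)) : List (List Char) :=
  PySem.List.dedup ((nl.filter (fun n => PySem.Chars.endswith n pvZipExt)).map pvParent)

-- find? only looks at its predicate on members of the list
theorem pv_find?_congr_mem {α : Type} (l : List α) (f g : α → Bool)
    (h : ∀ x ∈ l, f x = g x) : l.find? f = l.find? g := by
  induction l with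
  | nil => rfl
  | cons x xs ih =>
    have hx := h x (by simp)
    simp only [List.find?_cons, hx]
    cases g x
    · exact ih (fun y hy => h y (by simp [hy]))
    · rfl

-- A's first loop is a first-match scan over the prefix list with an any() condition
theorem pv_loop1_eq (all : List (List Char)) (xs : List (List Char)) :
    pvA_loop1 all xs =
      ((xs.filter (fun n => PySem.Chars.endswith n pvIdx)).map pvPrefixOf).find?
        (fun p => all.any (fun m => PySem.Chars.startswith m (p ++ pvData))) := by
  induction xs with
  | nil => rfl
  | cons n rest ih =>
    simp only [pvA_loop1]
    by_cases he : PySem.Chars.endswith n pvIdx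
    · have hfil : List.filter (fun n => PySem.Chars.endswith n pvIdx) (n :: rest)
          = n :: List.filter (fun n => PySem.Chars.endswith n pvIdx) rest := by simp [he]
      rw [if_pos he, hfil, List.map_cons]
      by_cases ha : all.any (fun m => PySem.Chars.startswith m (pvPrefixOf n ++ pvData)) = true
      · rw [if_pos ha]
        simp only [List.find?_cons, ha]
      · have ha' : (all.any fun m => PySem.Chars.startswith m (pvPrefixOf n ++ pvData)) = false :=
          by simpa using ha
        rw [if_neg ha, ih]
        simp only [List.find?_cons, ha']
    · have hfil : List.filter (fun n => PySem.Chars.endswith n pvIdx) (n :: rest)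
          = List.filter (fun n => PySem.Chars.endswith n pvIdx) rest := by simp [he]
      rw [if_neg he, hfil, ih]

-- Source B's single combined fold is four independent folds (the components do not interact)
theorem pv_fold_split (nl : List (List Char))
    (st : PySem.Set (List Char) × List (List Char) ×
          (PySem.Set (List Char) × List (List Char)) × PySem.Set (List Char)) :
    nl.foldl pvB_step st =
      (nl.foldl (fun s n => PySem.Set.add s n) st.1,
       nl.foldl (fun acc n =>
         if PySem.Chars.endswith n pvIdx then acc ++ [pvPrefixOf n] else acc) st.2.1,
       nl.foldl pvZStep st.2.2.1,
       nl.foldl (fun s n => pvB_inner n s) st.2.2.2) := by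
  induction nl generalizing st with
  | nil => rfl
  | cons n rest ih => simp only [List.foldl_cons, ih, pvB_step]

-- the zip_seen set and the zip_order list stay EQUAL through the pass and are a conditional-add fold
theorem pv_zfold (nl : List (List Char)) (s : PySem.Set (List Char)) :
    nl.foldl pvZStep (s, s) = (nl.foldl pvZAdd s, nl.foldl pvZAdd s) := by
  induction nl generalizing s with
  | nil => rfl
  | cons n rest ih =>
    have hstep : pvZStep (s, s) n = (pvZAdd s n, pvZAdd s n) := by
      simp only [pvZStep, pvZAdd]
      by_cases hz : PySem.Chars.endswith n pvZipExt
      · simp only [if_pos hz]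
        by_cases hc : PySem.Set.contains s (pvParent n) = true
        · have hm : pvParent n ∈ s := by simpa [PySem.Set.contains] using hc
          rw [if_pos hc, PySem.Set.add_of_mem hm]
        · have hm : pvParent n ∉ s := by simpa [PySem.Set.contains] using hc
          rw [if_neg hc, PySem.Set.add_of_not_mem hm]
      · simp [hz]
    rw [List.foldl_cons, List.foldl_cons, hstep, ih]

-- zip_order from the empty state = ordered dedup of the zip parents
theorem pv_zfold_closed (nl : List (List Char)) :
    nl.foldl pvZAdd [] = pvB_zipParents nl := by
  unfold pvZAdd
  rw [PySem.List.foldl_if_eq_foldl_filter, pvB_zipParents, PySem.List.dedup_eq_ofList,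
    ← PySem.Set.update_nil_left, PySem.Set.update_map_eq_foldl_add]

-- membership in a conditional-add fold
theorem pv_mem_foldl_condAdd (l : List Int) (p : Int → Bool) (f : Int → List Char)
    (s : PySem.Set (List Char)) (x : List Char) :
    x ∈ l.foldl (fun s j => if p j then PySem.Set.add s (f j) else s) s ↔
      x ∈ s ∨ ∃ j ∈ l, p j ∧ x = f j := by
  induction l generalizing s with
  | nil => simp
  | cons j rest ih =>
    rw [List.foldl_cons, ih]
    by_cases hp : p j = true
    · simp only [if_pos hp, PySem.Set.mem_add, List.mem_cons]
      constructor
      · rintro (⟨hs | he⟩ | ⟨k, hk, hpk, hx⟩)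
        · exact Or.inl hs
        · exact Or.inr ⟨j, Or.inl rfl, hp, he⟩
        · exact Or.inr ⟨k, Or.inr hk, hpk, hx⟩
      · rintro (hs | ⟨k, (rfl | hk), hpk, hx⟩)
        · exact Or.inl (Or.inl hs)
        · exact Or.inl (Or.inr hx)
        · exact Or.inr ⟨k, hk, hpk, hx⟩
    · simp only [if_neg hp, List.mem_cons]
      constructor
      · rintro (hs | ⟨k, hk, hpk, hx⟩)
        · exact Or.inl hs
        · exact Or.inr ⟨k, Or.inr hk, hpk, hx⟩
      · rintro (hs | ⟨k, (rfl | hk), hpk, hx⟩)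
        · exact Or.inl hs
        · exact absurd hpk hp
        · exact Or.inr ⟨k, hk, hpk, hx⟩

-- a "data/" occurrence at some position of n is exactly a prefix x with x ++ "data/" <+: n
theorem pv_slice_data_iff (n x : List Char) :
    (∃ j : Int, j ∈ PySem.List.pyRange 0 (n.length : Int) 1 ∧
      (PySem.Chars.slice n (some j) (some (j + 5)) == pvData) = true ∧
      x = PySem.Chars.slice n none (some j)) ↔ (x ++ pvData) <+: n := by
  constructor
  · rintro ⟨j, hj, hs, hx⟩
    rw [PySem.List.mem_pyRange_one] at hj
    obtain ⟨hj0, hjl⟩ := hj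
    set k := j.toNat with hk
    have hjk : j = (k : Int) := by omega
    have h5 : (k : Int) + 5 = ((k + 5 : Nat) : Int) := by omega
    rw [beq_iff_eq] at hs
    rw [PySem.Chars.slice_eq_listSlice, hjk, h5, PySem.List.slice_natCast] at hs
    rw [PySem.Chars.slice_eq_listSlice, PySem.List.slice_to n hj0] at hx
    have hpre : pvData <+: n.drop k := by
      have := List.take_prefix (k + 5 - k) (n.drop k)
      rwa [hs] at this
    obtain ⟨r, hr⟩ := hpre
    refine ⟨r, ?_⟩
    rw [hx, ← hk, List.append_assoc, hr, List.take_append_drop]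
  · rintro ⟨r, hr⟩
    refine ⟨(x.length : Int), ?_, ?_, ?_⟩
    · rw [PySem.List.mem_pyRange_one]
      have hln : n.length = x.length + pvData.length + r.length := by
        rw [← hr]; simp [List.length_append]; try omega
      have hd : pvData.length = 5 := rfl
      omega
    · rw [beq_iff_eq, PySem.Chars.slice_eq_listSlice]
      have h5 : (x.length : Int) + 5 = ((x.length + 5 : Nat) : Int) := by omega
      rw [h5, PySem.List.slice_natCast, ← hr]
      rw [List.append_assoc, List.drop_left]
      have h5d : pvData.length = 5 := rfl
      have hd : x.length + 5 - x.length = pvData.length := by omega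
      rw [hd, List.take_left]
    · rw [PySem.Chars.slice_eq_listSlice, PySem.List.slice_to n (Int.natCast_nonneg _)]
      rw [Int.toNat_natCast, ← hr, List.append_assoc, List.take_left]

-- the data_parents set after the whole pass: membership = some name has x ++ "data/" as a prefix
theorem pv_mem_dataFold (nl : List (List Char)) (s : PySem.Set (List Char)) (x : List Char) :
    x ∈ nl.foldl (fun s n => pvB_inner n s) s ↔
      x ∈ s ∨ ∃ n ∈ nl, (x ++ pvData) <+: n := by
  induction nl generalizing s with
  | nil => simp
  | cons n rest ih =>
    rw [List.foldl_cons, ih]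
    have hone : x ∈ pvB_inner n s ↔ x ∈ s ∨ (x ++ pvData) <+: n := by
      rw [pvB_inner, pv_mem_foldl_condAdd]
      constructor
      · rintro (hs | ⟨j, hj, hp, hx⟩)
        · exact Or.inl hs
        · exact Or.inr ((pv_slice_data_iff n x).mp ⟨j, hj, hp, hx⟩)
      · rintro (hs | hpre)
        · exact Or.inl hs
        · obtain ⟨j, hj, hp, hx⟩ := (pv_slice_data_iff n x).mpr hpre
          exact Or.inr ⟨j, hj, hp, hx⟩
    rw [hone]
    constructor
    · rintro (⟨hs | hpre⟩ | ⟨m, hm, hp⟩)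
      · exact Or.inl hs
      · exact Or.inr ⟨n, by simp, hpre⟩
      · exact Or.inr ⟨m, by simp [hm], hp⟩
    · rintro (hs | ⟨m, hm, hp⟩)
      · exact Or.inl (Or.inl hs)
      · rcases List.mem_cons.mp hm with rfl | hm'
        · exact Or.inl (Or.inr hp)
        · exact Or.inr ⟨m, hm', hp⟩

-- contains on data_parents = A's any() rescan
theorem pv_dataFold_contains (nl : List (List Char)) (p : List Char) :
    PySem.Set.contains (nl.foldl (fun s n => pvB_inner n s) PySem.Set.empty) p
      = nl.any (fun m => PySem.Chars.startswith m (p ++ pvData)) := by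
  rw [Bool.eq_iff_iff]
  have hmem : PySem.Set.contains (nl.foldl (fun s n => pvB_inner n s) PySem.Set.empty) p = true
      ↔ p ∈ nl.foldl (fun s n => pvB_inner n s) PySem.Set.empty := by
    simp [PySem.Set.contains]
  rw [hmem, pv_mem_dataFold, List.any_eq_true]
  simp only [PySem.Chars.startswith_iff]
  constructor
  · rintro (h0 | h)
    · simp [PySem.Set.empty] at h0
    · exact h
  · exact Or.inr

-- the grouped zip list stored under key k
def pvG (nl : List (List Char)) (k : List Char) : List (List Char) :=
  ((((nl.filter (fun n => PySem.Chars.endswith n pvZipExt)).map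
      (fun n => (pvParent n, n))).filter (fun q => q.1 == k)).map (·.2))

theorem pv_dict_eq_pairs (nl : List (List Char)) :
    pvA_dict nl =
      ((nl.filter (fun n => PySem.Chars.endswith n pvZipExt)).map
        (fun n => (pvParent n, n))).foldl
        (fun d q => d.modify q.1 [] (· ++ [q.2])) PySem.Dict.empty := by
  rw [List.foldl_map, List.foldl_filter]; rfl

theorem pv_dict_items (nl : List (List Char)) :
    (pvA_dict nl).items = (pvB_zipParents nl).map (fun k => (k, pvG nl k)) := by
  rw [pv_dict_eq_pairs]
  set l := (nl.filter (fun n => PySem.Chars.endswith n pvZipExt)).map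
    (fun n => (pvParent n, n)) with hl
  have hkeys : ((l.foldl (fun d q => d.modify q.1 [] (· ++ [q.2]))
      PySem.Dict.empty).keys) = pvB_zipParents nl := by
    have := PySem.Dict.keys_foldl_modify_key l (fun q => q.1) ([] : List (List Char))
      (fun _ q v => v ++ [q.2]) PySem.Dict.empty
    rw [PySem.Dict.keys_empty, PySem.Set.update_nil_left] at this
    rw [this, pvB_zipParents, PySem.List.dedup_eq_ofList, hl, List.map_map]
    simp [Function.comp_def]
  have hnodup : ((l.foldl (fun d q => d.modify q.1 [] (· ++ [q.2]))
      PySem.Dict.empty).keys).Nodup :=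
    PySem.Dict.nodup_keys_foldl_modify_key l (fun q => q.1) []
      (fun _ q v => v ++ [q.2]) PySem.Dict.empty PySem.Dict.nodup_keys_empty
  have hitems := PySem.Dict.items_eq_map_keys
    (l.foldl (fun d q => d.modify q.1 [] (· ++ [q.2])) PySem.Dict.empty) hnodup []
  rw [hitems, hkeys]
  refine List.map_congr_left (fun k _ => ?_)
  have hg := PySem.Dict.getD_foldl_modify_append l PySem.Dict.empty k
  rw [PySem.Dict.getD_empty] at hg
  rw [hg]; rfl

-- each stored zip list is nonempty
theorem pv_G_ne_nil (nl : List (List Char)) (k : List Char)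
    (hk : k ∈ pvB_zipParents nl) : pvG nl k ≠ [] := by
  rw [pvB_zipParents, PySem.List.dedup_eq_ofList, PySem.Set.mem_ofList, List.mem_map] at hk
  obtain ⟨n, hn, hpar⟩ := hk
  have : n ∈ pvG nl k := by
    rw [pvG]
    refine List.mem_map.2 ⟨(pvParent n, n), List.mem_filter.2 ⟨List.mem_map.2 ⟨n, hn, rfl⟩, ?_⟩, rfl⟩
    simp [hpar]
  exact List.ne_nil_of_mem this

-- A's second loop over the items of the grouped dict is a first-match scan over the parents
theorem pv_loop2_eq (all : List (List Char)) (ks : List (List Char))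
    (g : List Char → List (List Char)) (hne : ∀ k ∈ ks, g k ≠ []) :
    pvA_loop2 all (ks.map (fun k => (k, g k)))
      = ks.find? (fun k => !all.contains (k ++ pvIdx)) := by
  induction ks with
  | nil => rfl
  | cons k rest ih =>
    have hidx : (if k ≠ [] then k ++ pvIdx else pvIdx) = k ++ pvIdx := by
      by_cases hk : k = [] <;> simp [hk]
    have hempty : (g k).isEmpty = false := by
      simpa [List.isEmpty_iff] using hne k (by simp)
    simp only [List.map_cons, pvA_loop2, hidx, hempty, Bool.not_false, Bool.and_true,
      List.find?_cons]
    cases hc : !all.contains (k ++ pvIdx)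
    · simpa using ih (fun x hx => hne x (by simp [hx]))
    · simp

-- set(namelist) membership = list membership
theorem pv_contains_ofList (nl : List (List Char)) (x : List Char) :
    PySem.Set.contains (PySem.Set.ofList nl) x = nl.contains x := by
  rw [Bool.eq_iff_iff]
  simp [PySem.Set.contains, PySem.Set.mem_ofList]

-- ===== VERDICT (by name: the statement is the Claim_ definition above) =====
theorem find_report_root_py_spec : Claim_equal_find_report_root_py := by
  intro namelist _
  unfold Spec_find_report_root_py find_report_root_py find_report_root_py_alt
  simp only [pv_fold_split]
  generalize List.map String.toList namelist = nl
  have hidxf : List.foldl (fun acc n =>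
      if PySem.Chars.endswith n pvIdx then acc ++ [pvPrefixOf n] else acc) [] nl =
      pvB_idxPrefixes nl := by
    rw [PySem.List.foldl_append_if, List.nil_append, pvB_idxPrefixes]
  have hz : List.foldl pvZStep (PySem.Set.empty, []) nl
      = (pvB_zipParents nl, pvB_zipParents nl) := by
    have h0 : (PySem.Set.empty, ([] : List (List Char)))
        = (([] : PySem.Set (List Char)), ([] : List (List Char))) := rfl
    rw [h0, pv_zfold, pv_zfold_closed]
  have hnames : List.foldl (fun s n => PySem.Set.add s n) PySem.Set.empty nl
      = PySem.Set.ofList nl := (PySem.Set.ofList_eq_foldl nl).symm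
  rw [hidxf, hz, hnames]
  have h1 : pvA_loop1 nl nl =
      (pvB_idxPrefixes nl).find?
        (fun p => PySem.Set.contains
          (List.foldl (fun s n => pvB_inner n s) PySem.Set.empty nl) p) := by
    rw [pv_loop1_eq, pvB_idxPrefixes]
    exact pv_find?_congr_mem _ _ _ (fun p _ => (pv_dataFold_contains nl p).symm)
  rw [h1]
  cases hf : (pvB_idxPrefixes nl).find?
      (fun p => PySem.Set.contains
        (List.foldl (fun s n => pvB_inner n s) PySem.Set.empty nl) p) with
  | some p => rfl
  | none =>
    simp only []
    rw [pv_dict_items, pv_loop2_eq nl (pvB_zipParents nl) (pvG nl) (pv_G_ne_nil nl)]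
    congr 1
    exact pv_find?_congr_mem _ _ _
      (fun p _ => by rw [pv_contains_ofList nl (p ++ pvIdx)])
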